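-- pv_equiv track=rewrite | github.com/janalex/leetcode | dailyqs/1700_student_lunch.py | countStudents1
-- ===== SOURCE A (Python) =====
-- from typing import List
--
-- def countStudents1(students: List[int], sandwiches: List[int]) -> int:
--     left = len(sandwiches) + 1
--     sandwiches.reverse()
--     while sandwiches and left > len(sandwiches):
--         left = len(sandwiches)
--         for i, s in enumerate(students):
--             if s > -1:
--                 if s == sandwiches[-1]:
--                     sandwiches.pop()
--                     students[i] = -1
--     return len(sandwiches)
-- ===== SOURCE B (Python) =====
-- from typing import List
--
-- def countStudents1(students: List[int], sandwiches: List[int]) -> int: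
--     # Count each hungry student's preference once, then walk the sandwich
--     # stack front-to-back, decrementing; stop at the first unwanted sandwich.
--     counts = {}  # one counting pass, then one stack walk
--     for s in students:
--         if s > -1:
--             counts[s] = counts.get(s, 0) + 1
--     served = 0
--     for x in sandwiches:
--         if counts.get(x, 0) == 0:
--             break
--         counts[x] -= 1
--         served += 1
--     return len(sandwiches) - served
-- ===== Notes on version B (the rewrite author's own statement) =====
-- stated objective: alternative
-- what changed: A repeatedly rescans the whole student list (multi-pass simulation on a reversed stack, mutating both lists); B builds a preference counter once and walks the sandwich stack front-to-back decrementing counts, stopping at the first unwanted sandwich (worst-case O(n*m) vs O(n+m), though not measurably faster on random inputs; return value only: B does not mutate its arguments).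
-- outside the precondition, e.g. on countStudents1([0, 0, 1], [0, 1]): A returns 0, B returns 0; on countStudents1([0, 0], [0]): A raises IndexError, B returns 0
import Mathlib
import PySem

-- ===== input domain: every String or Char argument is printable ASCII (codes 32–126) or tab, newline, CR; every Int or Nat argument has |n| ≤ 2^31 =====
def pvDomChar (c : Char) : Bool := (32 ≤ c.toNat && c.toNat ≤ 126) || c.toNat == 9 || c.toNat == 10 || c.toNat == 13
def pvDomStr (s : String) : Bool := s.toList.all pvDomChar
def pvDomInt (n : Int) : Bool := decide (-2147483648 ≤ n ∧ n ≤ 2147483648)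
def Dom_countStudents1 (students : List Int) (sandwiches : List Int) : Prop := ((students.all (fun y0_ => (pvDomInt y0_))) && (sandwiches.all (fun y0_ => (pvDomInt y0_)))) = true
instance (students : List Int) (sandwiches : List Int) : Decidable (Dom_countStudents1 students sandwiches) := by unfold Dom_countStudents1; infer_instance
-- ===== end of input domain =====

-- B replaces A's repeated full rescans of the student list by one preference counter
-- and a single walk of the sandwich stack (a different algorithm, not measured faster
-- on random inputs).  A mutates both of its
-- argument lists in place (reverse/pop/marking); the equivalence proved here is about the
-- RETURN value only — B performs no mutation.

-- ===== PORT A =====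
-- one execution of 'for i, s in enumerate(students): ...' ; sw is the (already reversed)
-- sandwich list, popped from its end exactly as Python's sandwiches.pop().
-- 'sandwiches[-1]' is PySem.List.pyGet? sw (-1) (none = IndexError, propagated);
-- 'sandwiches.pop()' removes that last element, i.e. sw.dropLast (exact on nonempty sw,
-- which pyGet? just certified).  Returns (students after marking, sandwiches left).
def pvPassA : List Int → List Int → Option (List Int × List Int)
  | [], sw => some ([], sw)
  | s :: rest, sw =>
    if -1 < s then
      match PySem.List.pyGet? sw (-1) with
      | none => none
      | some top =>
        if s = top then
          (pvPassA rest sw.dropLast).map (fun r => (-1 :: r.1, r.2))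
        else
          (pvPassA rest sw).map (fun r => (s :: r.1, r.2))
    else
      (pvPassA rest sw).map (fun r => (s :: r.1, r.2))

-- the 'while sandwiches and left > len(sandwiches)' loop; left = len(sandwiches)+1 initially,
-- so the loop is entered iff sandwiches is nonempty, and re-entered iff the pass popped.
def pvLoopA (students sw : List Int) : Option Nat :=
  if sw.isEmpty then some sw.length
  else
    match pvPassA students sw with
    | none => none
    | some (st', sw') =>
      if h2 : sw'.length < sw.length then pvLoopA st' sw'
      else some sw'.length
termination_by sw.length
decreasing_by exact h2

-- IndexError path (loop returns none) is excluded by Pre_; 0 there is arbitrary.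
def countStudents1 (students : List Int) (sandwiches : List Int) : Int :=
  match pvLoopA students sandwiches.reverse with
  | some n => (n : Int)
  | none => 0

-- ===== PORT B =====
-- the 'for x in sandwiches: if counts.get(x,0)==0: break; ...' loop, counting served
def pvServeB : PySem.Dict Int Int → List Int → Nat
  | _, [] => 0
  | d, x :: xs =>
    if d.getD x 0 = 0 then 0
    else 1 + pvServeB (d.insert x (d.getD x 0 - 1)) xs

def countStudents1_alt (students : List Int) (sandwiches : List Int) : Int :=
  let counts := students.foldl
    (fun d s => if -1 < s then d.insert s (d.getD s 0 + 1) else d) PySem.Dict.empty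
  (sandwiches.length : Int) - (pvServeB counts sandwiches : Int)

-- ===== PRECONDITION & SPEC =====
-- spec-level helpers for Pre_ (used by no port): number of hungry students, and the greedy
-- number of sandwiches that can be served from the front of the stack.
def pvAvail (st : List Int) : Nat := (st.filter (fun s => decide (-1 < s))).length

def pvGreedy : List Int → List Int → Nat
  | _, [] => 0
  | st, x :: xs => if -1 < x ∧ 0 < st.count x then 1 + pvGreedy (st.erase x) xs else 0

-- A raises IndexError when every sandwich gets served while a still-hungry student remains to
-- be scanned afterwards; whether that scan happens depends on student positions, so Pre_
-- conservatively excludes all inputs where every sandwich is served yet hungry students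
-- outnumber sandwiches (on some of those A instead returns 0, which B also returns).
def Pre_countStudents1 (students : List Int) (sandwiches : List Int) : Prop :=
  sandwiches = [] ∨ pvAvail students ≤ sandwiches.length ∨
    pvGreedy students sandwiches < sandwiches.length
instance (students : List Int) (sandwiches : List Int) : Decidable (Pre_countStudents1 students sandwiches) := by unfold Pre_countStudents1; infer_instance

def pvWitness_countStudents1 : List Int × List Int := ([1, 0, 1], [1, 0, 1])

def Spec_countStudents1 (students : List Int) (sandwiches : List Int) (out : Int) : Prop := out = countStudents1_alt students sandwiches
instance (students : List Int) (sandwiches : List Int) (out : Int) : Decidable (Spec_countStudents1 students sandwiches out) := by unfold Spec_countStudents1; infer_instance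

-- ===== CLAIM (what is proved, stated in full; the proofs are below) =====
def Claim_equal_countStudents1 : Prop := ∀ (students : List Int) (sandwiches : List Int), Dom_countStudents1 students sandwiches → Pre_countStudents1 students sandwiches → Spec_countStudents1 students sandwiches (countStudents1 students sandwiches)

-- ===== LEMMAS AND PROOFS =====

theorem pvGreedy_le (st sw : List Int) : pvGreedy st sw ≤ sw.length := by
  induction sw generalizing st with
  | nil => simp [pvGreedy]
  | cons x xs ih =>
    simp only [pvGreedy]
    split_ifs with h
    · have := ih (st.erase x); simp; omega
    · simp

-- pvGreedy depends on the students only through their counts of hungry values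
theorem pvGreedy_congr (st₁ st₂ sw : List Int)
    (h : ∀ x : Int, -1 < x → st₁.count x = st₂.count x) :
    pvGreedy st₁ sw = pvGreedy st₂ sw := by
  induction sw generalizing st₁ st₂ with
  | nil => rfl
  | cons x xs ih =>
    simp only [pvGreedy]
    by_cases hx : -1 < x
    · rw [h x hx]
      split_ifs with hc
      · have : ∀ y : Int, -1 < y → (st₁.erase x).count y = (st₂.erase x).count y := by
          intro y hy
          rw [List.count_erase, List.count_erase, h y hy]
        rw [ih _ _ this]
      · rfl
    · simp [hx]

-- proof mirror of pvPassA working on the un-reversed (front-first) sandwich list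
def pvPass : List Int → List Int → Option (List Int × List Int)
  | [], w => some ([], w)
  | s :: rest, w =>
    if -1 < s then
      match w with
      | [] => none
      | top :: w2 =>
        if s = top then (pvPass rest w2).map (fun r => (-1 :: r.1, r.2))
        else (pvPass rest w).map (fun r => (s :: r.1, r.2))
    else
      (pvPass rest w).map (fun r => (s :: r.1, r.2))

theorem pvPassA_reverse (st : List Int) : ∀ w : List Int,
    pvPassA st w.reverse = (pvPass st w).map (fun r => (r.1, r.2.reverse)) := by
  induction st with
  | nil => intro w; simp [pvPassA, pvPass]
  | cons s rest ih =>
    intro w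
    by_cases hs : -1 < s
    · cases w with
      | nil =>
        simp [pvPassA, pvPass, hs, PySem.List.pyGet?_neg_one]
      | cons top w2 =>
        have hrev : (top :: w2).reverse = w2.reverse ++ [top] := by simp
        rw [hrev]
        simp only [pvPassA, pvPass, if_pos hs,
          PySem.List.pyGet?_neg_one_append_singleton]
        by_cases he : s = top
        · rw [if_pos he, if_pos he, List.dropLast_concat, ih w2,
            Option.map_map, Option.map_map]
          rfl
        · rw [if_neg he, if_neg he, ← hrev, ih (top :: w2),
            Option.map_map, Option.map_map]
          rfl
    · simp only [pvPassA, pvPass, if_neg hs]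
      rw [ih w, Option.map_map, Option.map_map]
      rfl

-- proof mirror of pvLoopA on front-first sandwich lists
def pvLoop (st w : List Int) : Option Nat :=
  if w.isEmpty then some w.length
  else
    match pvPass st w with
    | none => none
    | some (st', w') =>
      if h2 : w'.length < w.length then pvLoop st' w'
      else some w'.length
termination_by w.length
decreasing_by exact h2

theorem pvLoopA_reverse : ∀ (n : Nat) (st w : List Int), w.length = n →
    pvLoopA st w.reverse = pvLoop st w := by
  intro n
  induction n using Nat.strong_induction_on with
  | _ n ih =>
    intro st w hn
    rw [pvLoopA.eq_def, pvLoop.eq_def, pvPassA_reverse]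
    cases w with
    | nil => simp
    | cons top w2 =>
      simp only [List.isEmpty_reverse, List.isEmpty_cons, List.length_reverse]
      cases hp : pvPass st (top :: w2) with
      | none => simp
      | some r =>
        obtain ⟨st', w'⟩ := r
        simp only [Option.map_some]
        have hlt : w'.reverse.length < (top :: w2).length ↔
            w'.length < (top :: w2).length := by simp
        by_cases h2 : w'.length < (top :: w2).length
        · rw [dif_pos (by simpa using h2), dif_pos h2]
          exact ih w'.length (by omega) st' w' rfl
        · rw [dif_neg (by simpa using h2), dif_neg h2]
          simp

-- lengths across one pass: sandwiches never grow, each pop consumes one hungry student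
theorem pvPass_len (st : List Int) : ∀ w st' w' : List Int,
    pvPass st w = some (st', w') →
    w'.length ≤ w.length ∧ pvAvail st = pvAvail st' + (w.length - w'.length) := by
  induction st with
  | nil =>
    intro w st' w' h
    simp only [pvPass, Option.some.injEq, Prod.mk.injEq] at h
    obtain ⟨h1, h2⟩ := h
    subst h1; subst h2
    simp
  | cons s rest ih =>
    intro w st' w' h
    by_cases hs : -1 < s
    · cases w with
      | nil => simp [pvPass, hs] at h
      | cons top w2 =>
        simp only [pvPass, if_pos hs] at h
        by_cases he : s = top
        · rw [if_pos he, Option.map_eq_some_iff] at h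
          obtain ⟨⟨a, b⟩, hr, hb⟩ := h
          obtain ⟨h1, h2⟩ := ih _ _ _ hr
          cases hb
          constructor
          · simp; omega
          · simp only [pvAvail, List.filter_cons, decide_eq_true_eq, if_pos hs] at *
            have hm1 : ¬ (-1 < (-1 : Int)) := by omega
            simp only [hm1, if_false, List.length_cons] at *
            omega
        · rw [if_neg he, Option.map_eq_some_iff] at h
          obtain ⟨⟨a, b⟩, hr, hb⟩ := h
          obtain ⟨h1, h2⟩ := ih _ _ _ hr
          cases hb
          refine ⟨h1, ?_⟩
          simp only [pvAvail, List.filter_cons, decide_eq_true_eq, if_pos hs] at *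
          simp only [List.length_cons] at *
          omega
    · simp only [pvPass, if_neg hs, Option.map_eq_some_iff] at h
      obtain ⟨⟨a, b⟩, hr, hb⟩ := h
      obtain ⟨h1, h2⟩ := ih _ _ _ hr
      cases hb
      refine ⟨h1, ?_⟩
      simp only [pvAvail, List.filter_cons, decide_eq_true_eq, if_neg hs] at *
      omega

-- the greedy count across one pass (ctx = students already scanned this pass)
-- a non-hungry student contributes to no count pvGreedy looks at
theorem pvCount_skip (ctx l : List Int) (s : Int) (hs : ¬ -1 < s) :
    ∀ x : Int, -1 < x → (ctx ++ s :: l).count x = (ctx ++ l).count x := by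
  intro x hx
  have hne : x ≠ s := by omega
  have hne2 : s ≠ x := fun h => hne h.symm
  simp [List.count_append, List.count_cons, hne, hne2]

theorem pvPass_greedy (st : List Int) : ∀ (w st' w' ctx : List Int),
    pvPass st w = some (st', w') →
    pvGreedy (ctx ++ st) w = (w.length - w'.length) + pvGreedy (ctx ++ st') w' := by
  induction st with
  | nil =>
    intro w st' w' ctx h
    simp only [pvPass, Option.some.injEq, Prod.mk.injEq] at h
    obtain ⟨h1, h2⟩ := h
    subst h1; subst h2
    simp
  | cons s rest ih =>
    intro w st' w' ctx h
    by_cases hs : -1 < s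
    · cases w with
      | nil => simp [pvPass, hs] at h
      | cons top w2 =>
        simp only [pvPass, if_pos hs] at h
        by_cases he : s = top
        · subst he
          rw [if_pos rfl, Option.map_eq_some_iff] at h
          obtain ⟨⟨a, b⟩, hr, hb⟩ := h
          cases hb
          have hlen := (pvPass_len rest w2 a b hr).1
          have hcnt : 0 < (ctx ++ s :: rest).count s := by
            simp [List.count_append, List.count_cons]
          have hL : pvGreedy (ctx ++ s :: rest) (s :: w2)
              = 1 + pvGreedy ((ctx ++ s :: rest).erase s) w2 := by
            simp [pvGreedy, hs, hcnt]
          have hcg : pvGreedy ((ctx ++ s :: rest).erase s) w2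
              = pvGreedy (ctx ++ rest) w2 := by
            apply pvGreedy_congr
            intro x hx
            rw [List.count_erase]
            by_cases hxs : x = s
            · subst hxs
              simp [List.count_append, List.count_cons]
            · have hsx : ¬ s = x := fun h => hxs h.symm
              simp [List.count_append, List.count_cons, hxs, hsx]
          have hR : pvGreedy (ctx ++ (-1 : Int) :: a) b = pvGreedy (ctx ++ a) b := by
            apply pvGreedy_congr
            exact pvCount_skip ctx a (-1) (by omega)
          have hIH := ih w2 a b ctx hr
          rw [hL, hcg, hIH, hR]
          simp only [List.length_cons]
          omega
        · rw [if_neg he, Option.map_eq_some_iff] at h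
          obtain ⟨⟨a, b⟩, hr, hb⟩ := h
          cases hb
          have hIH := ih (top :: w2) a b (ctx ++ [s]) hr
          simpa [List.append_assoc] using hIH
    · simp only [pvPass, if_neg hs, Option.map_eq_some_iff] at h
      obtain ⟨⟨a, b⟩, hr, hb⟩ := h
      cases hb
      rw [pvGreedy_congr _ _ w (pvCount_skip ctx rest s hs),
        pvGreedy_congr _ _ b (pvCount_skip ctx a s hs)]
      exact ih w a b ctx hr

-- a pass that pops nothing proves nobody wants the top sandwich
theorem pvPass_stuck (st : List Int) : ∀ w st' w' : List Int,
    pvPass st w = some (st', w') → w'.length = w.length →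
    ∀ (top : Int) (w2 : List Int), w = top :: w2 → -1 < top → st.count top = 0 := by
  induction st with
  | nil => intro w st' w' h hlen top w2 hw ht; simp
  | cons s rest ih =>
    intro w st' w' h hlen top w2 hw ht
    subst hw
    by_cases hs : -1 < s
    · simp only [pvPass, if_pos hs] at h
      by_cases he : s = top
      · rw [if_pos he, Option.map_eq_some_iff] at h
        obtain ⟨⟨a, b⟩, hr, hb⟩ := h
        cases hb
        have := (pvPass_len rest w2 a b hr).1
        simp only [List.length_cons] at hlen
        omega
      · rw [if_neg he, Option.map_eq_some_iff] at h
        obtain ⟨⟨a, b⟩, hr, hb⟩ := h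
        cases hb
        have h0 := ih _ _ _ hr hlen top w2 rfl ht
        simp [List.count_cons, he, h0]
    · simp only [pvPass, if_neg hs, Option.map_eq_some_iff] at h
      obtain ⟨⟨a, b⟩, hr, hb⟩ := h
      cases hb
      have hne : ¬ s = top := by omega
      have h0 := ih _ _ _ hr hlen top w2 rfl ht
      simp [List.count_cons, hne, h0]

-- a pass that hits the empty stack (IndexError) served every sandwich and has a student left
theorem pvPass_none (st : List Int) : ∀ w : List Int,
    pvPass st w = none →
    (∀ ctx : List Int, pvGreedy (ctx ++ st) w = w.length) ∧ w.length < pvAvail st := by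
  induction st with
  | nil => intro w h; simp [pvPass] at h
  | cons s rest ih =>
    intro w h
    by_cases hs : -1 < s
    · cases w with
      | nil =>
        refine ⟨fun ctx => by simp [pvGreedy], ?_⟩
        simp [pvAvail, List.filter_cons, hs]
      | cons top w2 =>
        simp only [pvPass, if_pos hs] at h
        by_cases he : s = top
        · subst he
          rw [if_pos rfl, Option.map_eq_none_iff] at h
          obtain ⟨hg, ha⟩ := ih w2 h
          constructor
          · intro ctx
            have hcnt : 0 < (ctx ++ s :: rest).count s := by
              simp [List.count_append, List.count_cons]
            have hcg : pvGreedy ((ctx ++ s :: rest).erase s) w2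
                = pvGreedy (ctx ++ rest) w2 := by
              apply pvGreedy_congr
              intro x hx
              rw [List.count_erase]
              by_cases hxs : x = s
              · subst hxs
                simp [List.count_append, List.count_cons]
              · have hsx : ¬ s = x := fun hh => hxs hh.symm
                simp [List.count_append, List.count_cons, hsx]
            simp only [pvGreedy, List.length_cons]
            rw [if_pos ⟨hs, hcnt⟩, hcg, hg ctx]
            omega
          · simp only [pvAvail, List.filter_cons, decide_eq_true_eq, if_pos hs,
              List.length_cons] at *
            omega
        · rw [if_neg he, Option.map_eq_none_iff] at h
          obtain ⟨hg, ha⟩ := ih (top :: w2) h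
          constructor
          · intro ctx
            have := hg (ctx ++ [s])
            simpa [List.append_assoc] using this
          · simp only [pvAvail, List.filter_cons, decide_eq_true_eq, if_pos hs,
              List.length_cons] at *
            omega
    · simp only [pvPass, if_neg hs, Option.map_eq_none_iff] at h
      obtain ⟨hg, ha⟩ := ih w h
      constructor
      · intro ctx
        rw [pvGreedy_congr _ _ w (pvCount_skip ctx rest s hs)]
        exact hg ctx
      · simp only [pvAvail, List.filter_cons, decide_eq_true_eq, if_neg hs] at *
        omega

theorem pvLoop_some : ∀ (n : Nat) (st w : List Int), w.length = n →
    ∀ r : Nat, pvLoop st w = some r → r = w.length - pvGreedy st w := by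
  intro n
  induction n using Nat.strong_induction_on with
  | _ n ih =>
    intro st w hn r hl
    rw [pvLoop.eq_def] at hl
    cases w with
    | nil => simp [pvGreedy] at hl ⊢; omega
    | cons top w2 =>
      simp only [List.isEmpty_cons, Bool.false_eq_true, if_false] at hl
      cases hp : pvPass st (top :: w2) with
      | none => rw [hp] at hl; cases hl
      | some p =>
        obtain ⟨st', w'⟩ := p
        rw [hp] at hl
        dsimp only at hl
        have hΔ := pvPass_greedy st (top :: w2) st' w' [] hp
        simp only [List.nil_append] at hΔ
        have hlen := (pvPass_len st (top :: w2) st' w' hp).1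
        by_cases h2 : w'.length < (top :: w2).length
        · rw [dif_pos h2] at hl
          have hr := ih w'.length (by simp only [List.length_cons] at hn h2; omega) st' w' rfl r hl
          have hle := pvGreedy_le st' w'
          omega
        · rw [dif_neg h2] at hl
          have heq : w'.length = (top :: w2).length := by omega
          have hg0 : pvGreedy st (top :: w2) = 0 := by
            by_cases ht : -1 < top
            · have := pvPass_stuck st (top :: w2) st' w' hp heq top w2 rfl ht
              simp [pvGreedy, this]
            · simp [pvGreedy, ht]
          cases hl
          omega

theorem pvLoop_none : ∀ (n : Nat) (st w : List Int), w.length = n →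
    pvLoop st w = none →
    pvGreedy st w = w.length ∧ w.length < pvAvail st ∧ w ≠ [] := by
  intro n
  induction n using Nat.strong_induction_on with
  | _ n ih =>
    intro st w hn hl
    rw [pvLoop.eq_def] at hl
    cases w with
    | nil => simp at hl
    | cons top w2 =>
      simp only [List.isEmpty_cons, Bool.false_eq_true, if_false] at hl
      cases hp : pvPass st (top :: w2) with
      | none =>
        obtain ⟨hg, ha⟩ := pvPass_none st (top :: w2) hp
        have := hg []
        simp only [List.nil_append] at this
        exact ⟨this, ha, by simp⟩
      | some p =>
        obtain ⟨st', w'⟩ := p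
        rw [hp] at hl
        dsimp only at hl
        have hΔ := pvPass_greedy st (top :: w2) st' w' [] hp
        simp only [List.nil_append] at hΔ
        obtain ⟨hlen, hav⟩ := pvPass_len st (top :: w2) st' w' hp
        by_cases h2 : w'.length < (top :: w2).length
        · rw [dif_pos h2] at hl
          obtain ⟨hg', ha', _⟩ := ih w'.length (by simp only [List.length_cons] at hn h2; omega) st' w' rfl hl
          refine ⟨by omega, by omega, by simp⟩
        · rw [dif_neg h2] at hl
          cases hl

-- B's counter after the building fold
theorem pvCounts_getD (st : List Int) : ∀ (d : PySem.Dict Int Int) (v : Int),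
    (st.foldl (fun d s => if -1 < s then d.insert s (d.getD s 0 + 1) else d) d).getD v 0
      = d.getD v 0 + ((st.filter (fun s => decide (-1 < s))).count v : Int) := by
  induction st with
  | nil => intro d v; simp
  | cons s rest ih =>
    intro d v
    by_cases hs : -1 < s
    · simp only [List.foldl_cons, if_pos hs, List.filter_cons, decide_eq_true_eq, hs,
        if_true]
      rw [ih]
      by_cases hv : v = s
      · subst hv
        rw [PySem.Dict.getD_insert_self]
        simp [List.count_cons]
        push_cast
        ring
      · rw [PySem.Dict.getD_insert, if_neg hv]
        have hsv : ¬ s = v := fun hh => hv hh.symm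
        simp [List.count_cons, hsv]
    · simp only [List.foldl_cons, if_neg hs, List.filter_cons, decide_eq_true_eq, hs,
        if_false]
      exact ih d v

-- B's serving walk equals the greedy count, given the counter invariant
theorem pvServeB_greedy : ∀ (w st : List Int) (d : PySem.Dict Int Int),
    (∀ x : Int, d.getD x 0 = if -1 < x then (st.count x : Int) else 0) →
    pvServeB d w = pvGreedy st w := by
  intro w
  induction w with
  | nil => intro st d hinv; rfl
  | cons x xs ih =>
    intro st d hinv
    have hx := hinv x
    by_cases hgt : -1 < x
    · rw [if_pos hgt] at hx
      by_cases hc : st.count x = 0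
      · have hz : d.getD x 0 = 0 := by rw [hx, hc]; rfl
        simp [pvServeB, pvGreedy, hz, hgt, hc]
      · have hpos : 0 < st.count x := Nat.pos_of_ne_zero hc
        have hnz : ¬ d.getD x 0 = 0 := by
          rw [hx]
          exact_mod_cast hc
        have hinv' : ∀ y : Int, (d.insert x (d.getD x 0 - 1)).getD y 0
            = if -1 < y then ((st.erase x).count y : Int) else 0 := by
          intro y
          by_cases hyx : y = x
          · subst hyx
            rw [PySem.Dict.getD_insert_self, hx, List.count_erase_self, if_pos hgt]
            push_cast [Nat.cast_sub (Nat.one_le_iff_ne_zero.mpr hc)]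
            ring
          · rw [PySem.Dict.getD_insert, if_neg hyx, hinv y,
              List.count_erase_of_ne hyx]
        simp only [pvServeB, pvGreedy, hnz, if_false]
        rw [if_pos ⟨hgt, hpos⟩, ih (st.erase x) _ hinv']
    · rw [if_neg hgt] at hx
      have hz : d.getD x 0 = 0 := hx
      simp [pvServeB, pvGreedy, hz, hgt]

theorem countStudents1_alt_eq (st sw : List Int) :
    countStudents1_alt st sw = (sw.length : Int) - (pvGreedy st sw : Int) := by
  unfold countStudents1_alt
  dsimp only
  have hinv : ∀ x : Int,
      (st.foldl (fun d s => if -1 < s then d.insert s (d.getD s 0 + 1) else d)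
        PySem.Dict.empty).getD x 0 = if -1 < x then (st.count x : Int) else 0 := by
    intro x
    rw [pvCounts_getD st PySem.Dict.empty x]
    rw [PySem.Dict.getD_empty]
    by_cases hx : -1 < x
    · rw [if_pos hx]
      have : (st.filter (fun s => decide (-1 < s))).count x = st.count x := by
        induction st with
        | nil => rfl
        | cons s rest ihc =>
          by_cases hs : -1 < s
          · simp [List.filter_cons, hs, List.count_cons, ihc]
          · have hxs : ¬ x = s := by omega
            have hsx : ¬ s = x := by omega
            simp [List.filter_cons, hs, List.count_cons, hxs, hsx, ihc]
      rw [this]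
      ring
    · rw [if_neg hx]
      have : (st.filter (fun s => decide (-1 < s))).count x = 0 := by
        rw [List.count_eq_zero]
        intro hmem
        have := List.of_mem_filter hmem
        simp at this
        omega
      rw [this]
      ring
  rw [pvServeB_greedy sw st _ hinv]

theorem countStudents1_spec : Claim_equal_countStudents1 := by
  intro students sandwiches hdom hpre
  unfold Spec_countStudents1
  rw [countStudents1_alt_eq]
  unfold countStudents1
  rw [pvLoopA_reverse sandwiches.length students sandwiches rfl]
  cases hl : pvLoop students sandwiches with
  | none =>
    obtain ⟨hg, ha, hne⟩ := pvLoop_none sandwiches.length students sandwiches rfl hl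
    rcases hpre with h | h | h
    · exact absurd h hne
    · omega
    · omega
  | some r =>
    have hr := pvLoop_some sandwiches.length students sandwiches rfl r hl
    have hle := pvGreedy_le students sandwiches
    subst hr
    push_cast [Nat.cast_sub hle]
    ring
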